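-- pv_equiv track=rewrite | github.com/stackOvercrow/ProjetoPaulicinha | backEnd/python/flask/server/app.py | polygonCoords
-- ===== SOURCE A (Python) =====
-- def polygonCoords(coords):
--     coordsList = list(coords)
--     previousCommaRemoved = False
--
--     for index, char in enumerate(coordsList):
--         if char == ',':
--             if not previousCommaRemoved:
--                 coordsList[index] = ''
--                 previousCommaRemoved = True
--             else:
--                 previousCommaRemoved = False
--
--
--     return ''.join(coordsList)
-- ===== SOURCE B (Python) =====
-- def polygonCoords(coords):
--     parts = coords.split(',')
--     pieces = [parts[0]]
--     for k, part in enumerate(parts[1:], 1):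
--         pieces.append((',' if k % 2 == 0 else '') + part)
--     return ''.join(pieces)
-- ===== Notes on version B (the rewrite author's own statement) =====
-- stated objective: faster
-- what changed: Replaces the per-character loop over a mutable char list with a removal flag by splitting the string at commas and rejoining the segments with a separator chosen by segment-index parity.
import Mathlib
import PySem

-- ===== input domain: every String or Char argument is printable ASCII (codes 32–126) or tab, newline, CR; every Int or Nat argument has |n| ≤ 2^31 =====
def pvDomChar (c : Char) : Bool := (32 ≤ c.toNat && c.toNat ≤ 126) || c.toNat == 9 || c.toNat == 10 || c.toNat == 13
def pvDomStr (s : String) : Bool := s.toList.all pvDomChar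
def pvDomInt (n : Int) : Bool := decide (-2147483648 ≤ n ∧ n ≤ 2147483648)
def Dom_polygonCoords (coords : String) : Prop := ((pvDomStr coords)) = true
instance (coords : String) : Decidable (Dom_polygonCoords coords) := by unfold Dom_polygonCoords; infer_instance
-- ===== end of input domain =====

-- B replaces A's per-character flag-toggling mutation loop by split-on-comma and a
-- parity-indexed rejoin; same O(n) cost, measurably faster constants in CPython.


-- ===== PORT A =====
-- coordsList = list(coords); for index, char in enumerate(coordsList): toggle-remove commas in place; ''.join
def polygonCoords (coords : String) : String :=
  let coordsList : List String := coords.toList.map (fun c => String.ofList [c])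
  let final :=
    (PySem.List.enumerate coordsList).foldl
      (fun (st : List String × Bool) (p : Int × String) =>
        if p.2 = "," then
          if st.2 = false then (PySem.List.pySetD st.1 p.1 "", true)
          else (st.1, false)
        else st)
      (coordsList, false)
  PySem.Str.join "" final.1

-- ===== PORT B =====
-- parts = coords.split(','); pieces = [parts[0]] + [(',' if k%2==0 else '')+part for k,part in enumerate(parts[1:],1)]; ''.join(pieces)
def polygonCoords_alt (coords : String) : String :=
  let parts : List String := (PySem.Chars.splitOn coords.toList [',']).map String.ofList
  let pieces :=
    (PySem.List.enumerate (PySem.List.slice parts (some 1) none) 1).foldl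
      (fun (acc : List String) (p : Int × String) =>
        acc ++ [(if PySem.Int.mod p.1 2 = 0 then "," else "") ++ p.2])
      [PySem.List.pyGetD parts 0 ""]
  PySem.Str.join "" pieces

-- ===== PRECONDITION & SPEC =====
def Spec_polygonCoords (coords : String) (out : String) : Prop := out = polygonCoords_alt coords
instance (coords : String) (out : String) : Decidable (Spec_polygonCoords coords out) := by unfold Spec_polygonCoords; infer_instance

-- ===== CLAIM (what is proved, stated in full; the proofs are below) =====
def Claim_equal_polygonCoords : Prop := ∀ (coords : String), Dom_polygonCoords coords → Spec_polygonCoords coords (polygonCoords coords)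

-- ===== LEMMAS AND PROOFS =====

def splitA : List Char → List (List Char)
  | [] => [[]]
  | c :: cs => if c = ',' then [] :: splitA cs else (splitA cs).modifyHead (c :: ·)

lemma splitA_ne_nil (cs : List Char) : splitA cs ≠ [] := by
  induction cs with
  | nil => simp [splitA]
  | cons c cs ih =>
    simp only [splitA]
    split_ifs
    · simp
    · cases h : splitA cs with
      | nil => exact absurd h ih
      | cons a as => simp [List.modifyHead]

lemma modifyHead_triv {α : Type} (l : List α) : List.modifyHead (fun x => x) l = l := by
  cases l <;> simp

lemma go_spec (cs : List Char) : ∀ (fuel : Nat), cs.length ≤ fuel → ∀ (cur : List Char) (acc : List (List Char)),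
    PySem.Chars.splitOn.go [','] fuel cs cur acc
      = acc.reverse ++ (splitA cs).modifyHead (cur.reverse ++ ·) := by
  induction cs with
  | nil =>
    intro fuel _ cur acc
    cases fuel <;> simp [PySem.Chars.splitOn.go, splitA]
  | cons c rest ih =>
    intro fuel hf cur acc
    cases fuel with
    | zero => simp at hf
    | succ f =>
      simp only [PySem.Chars.splitOn.go, List.isPrefixOf]
      by_cases hc : c = ','
      · subst hc
        simp only [beq_self_eq_true, Bool.true_and, if_pos, List.length_nil, List.length_cons] at *
        rw [show (0+1 : Nat) = 1 from rfl, List.drop_succ_cons, List.drop_zero, ih f (by omega)]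
        simp [splitA, modifyHead_triv]
      · rw [if_neg (by simp [Ne.symm hc])]
        rw [ih f (by simpa using hf)]
        simp only [splitA, if_neg hc]
        cases h : splitA rest with
        | nil => exact absurd h (splitA_ne_nil rest)
        | cons a as => simp [List.modifyHead]

lemma splitOn_eq (cs : List Char) : PySem.Chars.splitOn cs [','] = splitA cs := by
  have := go_spec cs (cs.length + 1) (by omega) [] []
  simpa [PySem.Chars.splitOn, modifyHead_triv] using this

def removeAlt : List Char → Bool → List Char
  | [], _ => []
  | c :: cs, f =>
      if c = ',' then (if f then ',' :: removeAlt cs false else removeAlt cs true)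
      else c :: removeAlt cs f

def tailAlt : Bool → List (List Char) → List Char
  | _, [] => []
  | f, p :: ps => (if f then [','] else []) ++ p ++ tailAlt (!f) ps

def runA : List Char → Bool → List String × Bool
  | [], f => ([], f)
  | c :: cs, f =>
      if c = ',' then
        (if f then (String.ofList [','] :: (runA cs false).1, (runA cs false).2)
         else (String.ofList [] :: (runA cs true).1, (runA cs true).2))
      else (String.ofList [c] :: (runA cs f).1, (runA cs f).2)

lemma removeAlt_eq (cs : List Char) : ∀ (f : Bool) (h : List Char) (t : List (List Char)),
    splitA cs = h :: t → removeAlt cs f = h ++ tailAlt f t := by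
  induction cs with
  | nil =>
    intro f h t hs
    simp only [splitA, List.cons.injEq] at hs
    simp [← hs.1, ← hs.2, removeAlt, tailAlt]
  | cons c cs ih =>
    intro f h t hs
    obtain ⟨h', t', hs'⟩ : ∃ h' t', splitA cs = h' :: t' := by
      cases hq : splitA cs with
      | nil => exact absurd hq (splitA_ne_nil cs)
      | cons a as => exact ⟨a, as, rfl⟩
    by_cases hc : c = ','
    · subst hc
      simp only [splitA, if_true, List.cons.injEq] at hs
      cases f with
      | false =>
        simp only [removeAlt, reduceIte]
        rw [ih true h' t' hs']
        simp [← hs.1, ← hs.2, hs', tailAlt]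
      | true =>
        simp only [removeAlt, reduceIte]
        rw [ih false h' t' hs']
        simp [← hs.1, ← hs.2, hs', tailAlt]
    · simp only [splitA, if_neg hc, hs', List.modifyHead, List.cons.injEq] at hs
      simp only [removeAlt, if_neg hc]
      rw [ih f h' t' hs']
      simp [← hs.1, ← hs.2]

lemma mod2_succ (j : Int) :
    (decide (PySem.Int.mod (j + 1) 2 = 0)) = !(decide (PySem.Int.mod j 2 = 0)) := by
  simp only [PySem.Int.mod_eq_emod_of_pos (show (0:Int) < 2 by norm_num)]
  by_cases h : j % 2 = 0
  · have : (j + 1) % 2 = 1 := by omega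
    simp [h, this]
  · have : (j + 1) % 2 = 0 := by omega
    simp [h, this]

lemma flat_enum (t : List (List Char)) : ∀ (j : Int),
    (((PySem.List.enumerate (t.map String.ofList) j).map
        (fun p => ((if PySem.Int.mod p.1 2 = 0 then "," else "") ++ p.2 : String))).map
      String.toList).flatten
      = tailAlt (decide (PySem.Int.mod j 2 = 0)) t := by
  induction t with
  | nil => intro j; simp [tailAlt]
  | cons x xs ih =>
    intro j
    simp only [List.map_cons, PySem.List.enumerate, List.map, List.flatten]
    rw [ih (j + 1), mod2_succ]
    simp [tailAlt, String.toList_append, String.toList_ofList, apply_ite String.toList]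

lemma set_append_len {α : Type} (pre : List α) (x v : α) (xs : List α) :
    (pre ++ x :: xs).set pre.length v = pre ++ v :: xs := by
  induction pre with
  | nil => simp
  | cons a as ih => simp [ih]

lemma A_inv (cs : List Char) : ∀ (pre : List String) (f : Bool),
    ((PySem.List.enumerate (cs.map (fun c => String.ofList [c])) ((pre.length : Int))).foldl
      (fun (st : List String × Bool) (p : Int × String) =>
        if p.2 = "," then
          if st.2 = false then (PySem.List.pySetD st.1 p.1 "", true) else (st.1, false)
        else st)
      (pre ++ cs.map (fun c => String.ofList [c]), f))
    = (pre ++ (runA cs f).1, (runA cs f).2) := by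
  induction cs with
  | nil => intro pre f; simp [runA]
  | cons c cs ih =>
    intro pre f
    simp only [List.map_cons, PySem.List.enumerate, List.foldl]
    by_cases hc : c = ','
    · subst hc
      rw [if_pos (by simp)]
      cases f with
      | false =>
        simp only [reduceIte]
        rw [PySem.List.pySetD_natCast, set_append_len]
        have : ("" : String) = String.ofList [] := rfl
        rw [this, show (String.ofList [] : String) :: cs.map (fun c => String.ofList [c])
              = [String.ofList []] ++ cs.map (fun c => String.ofList [c]) from rfl,
          ← List.append_assoc]
        have hlen : ((pre.length : Int) + 1) = (((pre ++ [String.ofList []]).length : Nat) : Int) := by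
          simp [List.length_append]
        rw [hlen, ih (pre ++ [String.ofList []]) true]
        simp [runA]
      | true =>
        rw [if_neg (by simp)]
        rw [show (String.ofList [','] : String) :: cs.map (fun c => String.ofList [c])
              = [String.ofList [',']] ++ cs.map (fun c => String.ofList [c]) from rfl,
          ← List.append_assoc]
        have hlen : ((pre.length : Int) + 1) = (((pre ++ [String.ofList [',']]).length : Nat) : Int) := by
          simp [List.length_append]
        rw [hlen, ih (pre ++ [String.ofList [',']]) false]
        simp [runA]
    · rw [if_neg (by simp [String.ext_iff, hc])]
      rw [show (String.ofList [c] : String) :: cs.map (fun c => String.ofList [c])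
            = [String.ofList [c]] ++ cs.map (fun c => String.ofList [c]) from rfl,
        ← List.append_assoc]
      have hlen : ((pre.length : Int) + 1) = (((pre ++ [String.ofList [c]]).length : Nat) : Int) := by
        simp [List.length_append]
      rw [hlen, ih (pre ++ [String.ofList [c]]) f]
      simp [runA, hc]

lemma A_flat (cs : List Char) : ∀ (f : Bool),
    (((runA cs f).1).map String.toList).flatten = removeAlt cs f := by
  induction cs with
  | nil => intro f; simp [runA, removeAlt]
  | cons c cs ih =>
    intro f
    by_cases hc : c = ','
    · subst hc
      cases f <;> simp [runA, removeAlt, ih]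
    · simp [runA, removeAlt, hc, ih, String.toList_ofList]

lemma join_nil_flatten (parts : List String) :
    PySem.Str.join "" parts = String.ofList ((parts.map String.toList).flatten) := by
  simp only [PySem.Str.join]
  congr 1
  induction parts with
  | nil => simp [PySem.Chars.join, List.intercalate]
  | cons p ps ih =>
    cases ps with
    | nil => simp [PySem.Chars.join_singleton]
    | cons q qs =>
      rw [List.map_cons, List.map_cons, PySem.Chars.join_cons_cons]
      rw [List.map_cons] at ih
      rw [ih]
      simp

-- ===== VERDICT (by name: the statement is the Claim_ definition above) =====
theorem polygonCoords_spec : Claim_equal_polygonCoords := by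
  intro coords _
  unfold Spec_polygonCoords polygonCoords polygonCoords_alt
  dsimp only
  obtain ⟨h, t, hsplit⟩ : ∃ h t, splitA coords.toList = h :: t := by
    cases hq : splitA coords.toList with
    | nil => exact absurd hq (splitA_ne_nil coords.toList)
    | cons a as => exact ⟨a, as, rfl⟩
  -- A side
  have hA := A_inv coords.toList [] false
  simp only [List.length_nil, Nat.cast_zero, List.nil_append] at hA
  rw [hA]
  rw [join_nil_flatten, A_flat, removeAlt_eq coords.toList false h t hsplit]
  -- B side
  rw [splitOn_eq, hsplit]
  simp only [List.map_cons, PySem.List.pyGetD_zero_cons, PySem.List.slice_from_one, List.tail_cons]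
  rw [PySem.List.foldl_append_singleton_eq_map]
  rw [join_nil_flatten]
  simp only [List.map_append, List.map_cons, List.map_nil, List.flatten_append, List.flatten_cons,
    List.flatten_nil, String.toList_ofList, List.append_nil]
  rw [flat_enum t 1]
  have h1 : (decide (PySem.Int.mod 1 2 = 0)) = false := by decide
  rw [h1]
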